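-- pv_equiv track=rewrite | github.com/lovec741/personal-page | app/assignments.py | _get_localized_text
-- ===== SOURCE A (Python) =====
-- from typing import Dict, List, Set, Tuple
--
-- def _get_localized_text(texts: List[Dict]):
--     localized_text = None
--     for text in texts:
--         if text.get('locale') == 'cs':
--             localized_text = text
--             break
--
--     if localized_text is None:
--         for text in texts:
--             if text.get('locale') == 'en':
--                 localized_text = text
--                 break
--
--     if localized_text is None and texts:
--         localized_text = texts[0]
--     return localized_text
-- ===== SOURCE B (Python) =====
-- def _get_localized_text(texts):
--     cs_match = None
--     en_match = None
--     for text in texts: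
--         loc = text.get('locale')
--         if loc == 'cs' and cs_match is None:
--             cs_match = text
--         elif loc == 'en' and en_match is None:
--             en_match = text
--     if cs_match is not None:
--         return cs_match
--     if en_match is not None:
--         return en_match
--     if texts:
--         return texts[0]
--     return None
-- ===== Notes on version B (the rewrite author's own statement) =====
-- stated objective: alternative
-- what changed: Single pass tracking first 'cs' and first 'en' matches in two variables, instead of A's two separate scans with break; final selection by explicit None checks.
import Mathlib
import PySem

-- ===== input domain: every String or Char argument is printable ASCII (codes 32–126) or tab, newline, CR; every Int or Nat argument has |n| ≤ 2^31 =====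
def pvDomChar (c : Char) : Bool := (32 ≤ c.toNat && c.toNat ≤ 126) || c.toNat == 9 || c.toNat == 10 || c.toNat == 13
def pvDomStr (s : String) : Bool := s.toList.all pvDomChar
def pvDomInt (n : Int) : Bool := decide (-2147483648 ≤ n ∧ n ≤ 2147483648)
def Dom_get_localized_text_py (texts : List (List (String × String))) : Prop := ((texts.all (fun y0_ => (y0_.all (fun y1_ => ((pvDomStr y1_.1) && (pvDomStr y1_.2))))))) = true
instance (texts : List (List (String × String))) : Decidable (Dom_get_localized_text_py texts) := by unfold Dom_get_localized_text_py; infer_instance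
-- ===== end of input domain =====

-- B does one pass keeping the first 'cs' and first 'en' matches instead of A's two scans with break; same result, alternative decomposition (return value only).

-- ===== PORT A =====
-- A's first loop: scan for the first text with locale 'cs', break on hit.
def pvFindCs : List (List (String × String)) → Option (List (String × String))
  | [] => none
  | t :: ts => if (PySem.Dict.mk t).get? "locale" == some "cs" then some t else pvFindCs ts

-- A's second loop: scan for the first text with locale 'en', break on hit.
def pvFindEn : List (List (String × String)) → Option (List (String × String))
  | [] => none
  | t :: ts => if (PySem.Dict.mk t).get? "locale" == some "en" then some t else pvFindEn ts

def get_localized_text_py (texts : List (List (String × String))) : Option (List (String × String)) :=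
  let localized_text := pvFindCs texts
  let localized_text :=
    match localized_text with
    | none => pvFindEn texts
    | some t => some t
  match localized_text, texts with
  | none, t0 :: _ => some t0
  | lt, _ => lt

-- ===== PORT B =====
-- B's single loop: two accumulators, each set to the first matching text while still none.
def pvAltLoop : List (List (String × String)) → Option (List (String × String)) → Option (List (String × String)) → Option (List (String × String)) × Option (List (String × String))
  | [], cs, en => (cs, en)
  | t :: ts, cs, en =>
    let loc := (PySem.Dict.mk t).get? "locale"
    if loc == some "cs" && cs.isNone then pvAltLoop ts (some t) en
    else if loc == some "en" && en.isNone then pvAltLoop ts cs (some t)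
    else pvAltLoop ts cs en

def get_localized_text_py_alt (texts : List (List (String × String))) : Option (List (String × String)) :=
  match pvAltLoop texts none none with
  | (some c, _) => some c
  | (none, some e) => some e
  | (none, none) =>
    match texts with
    | t0 :: _ => some t0
    | [] => none

-- ===== PRECONDITION & SPEC =====
def Spec_get_localized_text_py (texts : List (List (String × String))) (out : Option (List (String × String))) : Prop := out = get_localized_text_py_alt texts
instance (texts : List (List (String × String))) (out : Option (List (String × String))) : Decidable (Spec_get_localized_text_py texts out) := by unfold Spec_get_localized_text_py; infer_instance

-- ===== CLAIM (what is proved, stated in full; the proofs are below) =====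
def Claim_equal_get_localized_text_py : Prop := ∀ (texts : List (List (String × String))), Dom_get_localized_text_py texts → Spec_get_localized_text_py texts (get_localized_text_py texts)

-- ===== LEMMAS AND PROOFS =====

lemma pvAltLoop_char (ts : List (List (String × String))) :
    ∀ cs en, pvAltLoop ts cs en = (cs.or (pvFindCs ts), en.or (pvFindEn ts)) := by
  induction ts with
  | nil => intro cs en; simp [pvAltLoop, pvFindCs, pvFindEn]
  | cons t ts ih =>
    intro cs en
    simp only [pvAltLoop, pvFindCs, pvFindEn]
    by_cases hcs : (PySem.Dict.mk t).get? "locale" == some "cs"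
    · have hen : ¬ ((PySem.Dict.mk t).get? "locale" == some "en") := by
        simp_all
      cases cs with
      | none => simp [hcs, hen, ih]
      | some c => simp [hcs, hen, ih]
    · by_cases hen : (PySem.Dict.mk t).get? "locale" == some "en"
      · cases en with
        | none => simp [hcs, hen, ih]
        | some e => simp [hcs, hen, ih]
      · simp [hcs, hen, ih]

-- ===== VERDICT (by name: the statement is the Claim_ definition above) =====
theorem get_localized_text_py_spec : Claim_equal_get_localized_text_py := by
  intro texts _
  unfold Spec_get_localized_text_py get_localized_text_py get_localized_text_py_alt
  rw [pvAltLoop_char]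
  cases h1 : pvFindCs texts <;> cases h2 : pvFindEn texts <;> cases texts <;> simp [Option.or]
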